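-- pv_equiv track=rewrite | github.com/BiggestGuille/Algorithmics | Divide & Conquer Algorithms/sample-universoAdecuado/drStrange.py | binarySearchPreAndNext
-- ===== SOURCE A (Python) =====
-- def binarySearchPreAndNext(data, low, high, search):
--     preAndNext = []
--     if low > high:
--         if high >= 0 and high < len(data):
--             preAndNext.append(data[high])
--         else:
--             preAndNext.append('VACIO')
--         if low >= 0 and low < len(data):
--             preAndNext.append(data[low])
--         else:
--             preAndNext.append('VACIO')
--         return preAndNext
--     mid = (low + high) // 2
--     if search == data[mid]:
--         if mid - 1 >= 0:
--             preAndNext.append(data[mid - 1])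
--         else:
--             preAndNext.append('VACIO')
--         if mid + 1 < len(data):
--             preAndNext.append(data[mid + 1])
--         else:
--             preAndNext.append('VACIO')
--         return preAndNext
--     elif search < data[mid]:
--         return binarySearchPreAndNext(data, low, mid - 1, search)
--     else:
--         return binarySearchPreAndNext(data, mid + 1, high, search)
-- ===== SOURCE B (Python) =====
-- def _get(data, i):
--     return data[i] if 0 <= i < len(data) else 'VACIO'
--
--
-- def _locate(data, low, high, search):
--     # iterative probe loop: same probe sequence as the recursion, but as a
--     # while-loop over local low/high; reports the hit index or the exit bounds
--     while low <= high:
--         mid = (low + high) // 2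
--         if data[mid] == search:
--             return mid, low, high
--         if search < data[mid]:
--             high = mid - 1
--         else:
--             low = mid + 1
--     return None, low, high
--
--
-- def binarySearchPreAndNext(data, low, high, search):
--     hit, low, high = _locate(data, low, high, search)
--     if hit is None:
--         i, j = high, low
--     else:
--         i, j = hit - 1, hit + 1
--     return [_get(data, i), _get(data, j)]
-- ===== Notes on version B (the rewrite author's own statement) =====
-- stated objective: simpler
-- what changed: The recursive search is replaced by an iterative while-loop that only locates the relevant index (the hit, or the exit bounds), after which a single shared guarded-access helper builds the two-element answer, instead of four inlined guard/append blocks across two return sites.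
-- outside the precondition, e.g. on binarySearchPreAndNext(['a', 'b'], -2, -2, 'a'): A returns ['VACIO', 'b'], B returns ['VACIO', 'VACIO']
import Mathlib
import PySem

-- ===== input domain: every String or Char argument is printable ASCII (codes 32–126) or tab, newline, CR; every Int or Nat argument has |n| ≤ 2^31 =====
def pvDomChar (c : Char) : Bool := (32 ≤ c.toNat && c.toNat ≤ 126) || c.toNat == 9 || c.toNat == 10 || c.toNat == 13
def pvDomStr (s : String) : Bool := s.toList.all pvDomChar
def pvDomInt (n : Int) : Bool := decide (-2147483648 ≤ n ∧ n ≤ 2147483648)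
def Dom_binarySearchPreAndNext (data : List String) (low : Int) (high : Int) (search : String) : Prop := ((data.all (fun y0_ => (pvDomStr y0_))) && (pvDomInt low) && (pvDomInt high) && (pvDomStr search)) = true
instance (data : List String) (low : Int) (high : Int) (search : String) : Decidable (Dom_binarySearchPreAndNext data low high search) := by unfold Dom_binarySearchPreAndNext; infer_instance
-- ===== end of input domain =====

-- B replaces the recursion by an iterative locate loop plus one shared guarded-access helper (objective: simpler).

-- ===== PORT A =====
def binarySearchPreAndNext (data : List String) (low : Int) (high : Int) (search : String) : List String :=
  if _hlh : low > high then
    (if 0 ≤ high ∧ high < (data.length : Int) then [PySem.List.pyGetD data high "VACIO"] else ["VACIO"])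
    ++ (if 0 ≤ low ∧ low < (data.length : Int) then [PySem.List.pyGetD data low "VACIO"] else ["VACIO"])
  else
    let mid := PySem.Int.floordiv (low + high) 2
    let dmid := PySem.List.pyGetD data mid ""   -- data[mid]; in-range under Pre_, default never used there
    if search = dmid then
      (if 0 ≤ mid - 1 then [PySem.List.pyGetD data (mid - 1) "VACIO"] else ["VACIO"])
      ++ (if mid + 1 < (data.length : Int) then [PySem.List.pyGetD data (mid + 1) "VACIO"] else ["VACIO"])
    else if search < dmid then binarySearchPreAndNext data low (mid - 1) search
    else binarySearchPreAndNext data (mid + 1) high search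
termination_by (high + 1 - low).toNat
decreasing_by
  · have hb := PySem.Int.floordiv_two_mid_bounds (by omega : low ≤ high)
    omega
  · have hb := PySem.Int.floordiv_two_mid_bounds (by omega : low ≤ high)
    omega

-- ===== PORT B =====
def pvAltGet (data : List String) (i : Int) : String :=
  if 0 ≤ i ∧ i < (data.length : Int) then PySem.List.pyGetD data i "VACIO" else "VACIO"

def pvAltLocate (data : List String) (low : Int) (high : Int) (search : String) : Option Int × Int × Int :=
  if _h : low ≤ high then
    let mid := PySem.Int.floordiv (low + high) 2
    if PySem.List.pyGetD data mid "" = search then (some mid, low, high)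
    else if search < PySem.List.pyGetD data mid "" then pvAltLocate data low (mid - 1) search
    else pvAltLocate data (mid + 1) high search
  else (none, low, high)
termination_by (high + 1 - low).toNat
decreasing_by
  · have hb := PySem.Int.floordiv_two_mid_bounds (by omega : low ≤ high)
    omega
  · have hb := PySem.Int.floordiv_two_mid_bounds (by omega : low ≤ high)
    omega

def binarySearchPreAndNext_alt (data : List String) (low : Int) (high : Int) (search : String) : List String :=
  match pvAltLocate data low high search with
  | (some hit, _, _) => [pvAltGet data (hit - 1), pvAltGet data (hit + 1)]
  | (none, low', high') => [pvAltGet data high', pvAltGet data low']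

-- ===== PRECONDITION & SPEC =====
-- Pre_ excludes inputs with low ≤ high that fall outside [0, len): there A's probes can hit negative
-- indices that Python silently wraps around (or raise IndexError), an artefact of A's implementation.
def Pre_binarySearchPreAndNext (data : List String) (low : Int) (high : Int) (search : String) : Prop :=
  low > high ∨ (0 ≤ low ∧ high < (data.length : Int))
instance (data : List String) (low : Int) (high : Int) (search : String) : Decidable (Pre_binarySearchPreAndNext data low high search) := by unfold Pre_binarySearchPreAndNext; infer_instance

def pvWitness_binarySearchPreAndNext : List String × Int × Int × String := (["a", "b"], 0, 1, "b")

def Spec_binarySearchPreAndNext (data : List String) (low : Int) (high : Int) (search : String) (out : List String) : Prop := out = binarySearchPreAndNext_alt data low high search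
instance (data : List String) (low : Int) (high : Int) (search : String) (out : List String) : Decidable (Spec_binarySearchPreAndNext data low high search out) := by unfold Spec_binarySearchPreAndNext; infer_instance

-- ===== CLAIM (what is proved, stated in full; the proofs are below) =====
def Claim_equal_binarySearchPreAndNext : Prop := ∀ (data : List String) (low : Int) (high : Int) (search : String), Dom_binarySearchPreAndNext data low high search → Pre_binarySearchPreAndNext data low high search → Spec_binarySearchPreAndNext data low high search (binarySearchPreAndNext data low high search)

-- ===== LEMMAS AND PROOFS =====

-- On an empty interval both programs build the same two guarded lookups.
lemma pv_base_eq (data : List String) (low high : Int) (search : String) (h : low > high) :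
    binarySearchPreAndNext data low high search = binarySearchPreAndNext_alt data low high search := by
  rw [binarySearchPreAndNext, binarySearchPreAndNext_alt, pvAltLocate]
  simp only [h, dif_pos, dite_eq_ite, if_neg (by omega : ¬ low ≤ high)]
  unfold pvAltGet
  split_ifs <;> rfl

-- Inside the invariant 0 ≤ low, high < len the recursion and the loop follow the same probe path.
lemma pv_main_eq (data : List String) (search : String) :
    ∀ n (low high : Int), (high + 1 - low).toNat ≤ n → 0 ≤ low → high < (data.length : Int) →
      binarySearchPreAndNext data low high search = binarySearchPreAndNext_alt data low high search := by
  intro n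
  induction n with
  | zero =>
    intro low high hm _ _
    exact pv_base_eq data low high search (by omega)
  | succ n ih =>
    intro low high hm hlo hhi
    by_cases hlh : low ≤ high
    · have hb := PySem.Int.floordiv_two_mid_bounds (hlh)
      set mid := PySem.Int.floordiv (low + high) 2 with hmid
      rw [binarySearchPreAndNext, dif_neg (by omega : ¬ low > high)]
      simp only [← hmid]
      by_cases heq : search = PySem.List.pyGetD data mid ""
      · -- found: the loop stops at mid and the shared helper matches A's one-sided guards
        have hloc : pvAltLocate data low high search = (some mid, low, high) := by
          rw [pvAltLocate]
          simp only [hlh, dif_pos, ← hmid, if_pos heq.symm]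
        rw [binarySearchPreAndNext_alt, hloc]
        simp only [if_pos heq, pvAltGet]
        split_ifs <;> first | rfl | omega
      · by_cases hlt : search < PySem.List.pyGetD data mid ""
        · have hloc : pvAltLocate data low high search = pvAltLocate data low (mid - 1) search := by
            rw [pvAltLocate]
            simp only [hlh, dif_pos, ← hmid, if_neg (Ne.symm heq), if_pos hlt]
          rw [if_neg heq, if_pos hlt, ih low (mid - 1) (by omega) hlo (by omega),
            binarySearchPreAndNext_alt, binarySearchPreAndNext_alt, hloc]
        · have hloc : pvAltLocate data low high search = pvAltLocate data (mid + 1) high search := by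
            rw [pvAltLocate]
            simp only [hlh, dif_pos, ← hmid, if_neg (Ne.symm heq), if_neg hlt]
          rw [if_neg heq, if_neg hlt, ih (mid + 1) high (by omega) (by omega) hhi,
            binarySearchPreAndNext_alt, binarySearchPreAndNext_alt, hloc]
    · exact pv_base_eq data low high search (by omega)

-- ===== VERDICT (by name: the statement is the Claim_ definition above) =====
theorem binarySearchPreAndNext_spec : Claim_equal_binarySearchPreAndNext := by
  intro data low high search _dom hpre
  unfold Spec_binarySearchPreAndNext
  rcases hpre with h | ⟨hlo, hhi⟩
  · exact pv_base_eq data low high search h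
  · exact pv_main_eq data search (high + 1 - low).toNat low high le_rfl hlo hhi
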